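-- pv_equiv track=rewrite | github.com/zachs18/minturn_problem | minturn_problem.py | all_liner_with_zero
-- ===== SOURCE A (Python) =====
-- from typing import Tuple, List, Set
--
-- Points = Tuple[int, int, int, int] # points
--
-- def all_liner_with_zero(ps: Points) -> List[Points]:
-- 	same_direction_points = []
-- 	opposite_direction_points = []
-- 	for i in range(12):
-- 		sdp = tuple(sorted((p+i)%12 for p in ps))
-- 		odp = tuple(sorted((i-p)%12 for p in ps))
-- 		if 0 in sdp:
-- 			same_direction_points.append(sdp)
-- 		if 0 in odp:
-- 			opposite_direction_points.append(odp)
-- 	return same_direction_points + opposite_direction_points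
-- ===== SOURCE B (Python) =====
-- from typing import Tuple, List
--
-- Points = Tuple[int, int, int, int]
--
-- def all_liner_with_zero(ps: Points) -> List[Points]:
-- 	# A rotation i makes 0 appear iff i is the residue that cancels some point,
-- 	# so compute the qualifying indices directly instead of scanning all 12.
-- 	same_idx = sorted(set((-p) % 12 for p in ps))
-- 	opp_idx = sorted(set(p % 12 for p in ps))
-- 	same_direction_points = [tuple(sorted((p + i) % 12 for p in ps)) for i in same_idx]
-- 	opposite_direction_points = [tuple(sorted((i - p) % 12 for p in ps)) for i in opp_idx]
-- 	return same_direction_points + opposite_direction_points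
-- ===== Notes on version B (the rewrite author's own statement) =====
-- stated objective: simpler
-- what changed: Instead of scanning all 12 rotation indices and filtering the sorted tuples that contain 0, B computes the qualifying indices directly as sorted(set((-p)%12)) and sorted(set(p%12)) and builds each result tuple once per qualifying index.
import Mathlib
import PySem

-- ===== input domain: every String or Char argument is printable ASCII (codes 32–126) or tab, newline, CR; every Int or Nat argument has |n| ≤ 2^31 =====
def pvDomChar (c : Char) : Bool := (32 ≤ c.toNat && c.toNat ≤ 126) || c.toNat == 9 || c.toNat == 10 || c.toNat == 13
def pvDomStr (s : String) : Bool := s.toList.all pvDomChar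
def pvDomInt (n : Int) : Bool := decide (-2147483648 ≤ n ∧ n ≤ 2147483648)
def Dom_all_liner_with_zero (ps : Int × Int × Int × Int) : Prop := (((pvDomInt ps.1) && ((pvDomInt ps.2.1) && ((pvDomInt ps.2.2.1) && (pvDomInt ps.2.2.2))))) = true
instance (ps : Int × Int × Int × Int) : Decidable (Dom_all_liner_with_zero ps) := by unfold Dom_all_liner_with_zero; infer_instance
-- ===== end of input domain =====

-- B replaces A's scan over all 12 rotation indices (filtering those whose sorted tuple
-- contains 0) by directly computing the qualifying indices as sorted(set((-p)%12)) /
-- sorted(set(p%12)); objective: simpler.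


-- ===== PORT A =====
-- tuple(sorted(<4 ints>)) : a sorted 4-element list packed into the 4-tuple
def pvTup4 (l : List Int) : Int × Int × Int × Int :=
  match l with
  | [a, b, c, d] => (a, b, c, d)
  | _ => (0, 0, 0, 0)

-- `0 in t` for a 4-tuple
def pvMem0 (t : Int × Int × Int × Int) : Bool :=
  t.1 == 0 || t.2.1 == 0 || t.2.2.1 == 0 || t.2.2.2 == 0

-- tuple(sorted((p+i)%12 for p in ps))
def pvSdp (ps : Int × Int × Int × Int) (i : Int) : Int × Int × Int × Int :=
  pvTup4 (PySem.List.sorted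
    [PySem.Int.mod (ps.1 + i) 12, PySem.Int.mod (ps.2.1 + i) 12,
     PySem.Int.mod (ps.2.2.1 + i) 12, PySem.Int.mod (ps.2.2.2 + i) 12]
    (fun x => x) false)

-- tuple(sorted((i-p)%12 for p in ps))
def pvOdp (ps : Int × Int × Int × Int) (i : Int) : Int × Int × Int × Int :=
  pvTup4 (PySem.List.sorted
    [PySem.Int.mod (i - ps.1) 12, PySem.Int.mod (i - ps.2.1) 12,
     PySem.Int.mod (i - ps.2.2.1) 12, PySem.Int.mod (i - ps.2.2.2) 12]
    (fun x => x) false)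

def all_liner_with_zero (ps : Int × Int × Int × Int) : List (Int × Int × Int × Int) :=
  let r := (PySem.List.pyRange 0 12 1).foldl
    (fun (acc : List (Int × Int × Int × Int) × List (Int × Int × Int × Int)) i =>
      let sdp := pvSdp ps i
      let odp := pvOdp ps i
      (if pvMem0 sdp then acc.1 ++ [sdp] else acc.1,
       if pvMem0 odp then acc.2 ++ [odp] else acc.2))
    ([], [])
  r.1 ++ r.2

-- ===== PORT B =====
def all_liner_with_zero_alt (ps : Int × Int × Int × Int) : List (Int × Int × Int × Int) :=
  let same_idx := PySem.List.sorted
    (PySem.Set.ofList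
      [PySem.Int.mod (-ps.1) 12, PySem.Int.mod (-ps.2.1) 12,
       PySem.Int.mod (-ps.2.2.1) 12, PySem.Int.mod (-ps.2.2.2) 12])
    (fun x => x) false
  let opp_idx := PySem.List.sorted
    (PySem.Set.ofList
      [PySem.Int.mod ps.1 12, PySem.Int.mod ps.2.1 12,
       PySem.Int.mod ps.2.2.1 12, PySem.Int.mod ps.2.2.2 12])
    (fun x => x) false
  same_idx.map (fun i => pvSdp ps i) ++ opp_idx.map (fun i => pvOdp ps i)

-- ===== PRECONDITION & SPEC =====
def Spec_all_liner_with_zero (ps : Int × Int × Int × Int) (out : List (Int × Int × Int × Int)) : Prop := out = all_liner_with_zero_alt ps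
instance (ps : Int × Int × Int × Int) (out : List (Int × Int × Int × Int)) : Decidable (Spec_all_liner_with_zero ps out) := by unfold Spec_all_liner_with_zero; infer_instance

-- ===== CLAIM (what is proved, stated in full; the proofs are below) =====
def Claim_equal_all_liner_with_zero : Prop := ∀ (ps : Int × Int × Int × Int), Dom_all_liner_with_zero ps → Spec_all_liner_with_zero ps (all_liner_with_zero ps)

-- ===== LEMMAS AND PROOFS =====

-- a foldl over a pair of independently-updated accumulators splits into two foldls
theorem pv_foldl_split {α β γ : Type} (l : List α) (g1 : β → α → β) (g2 : γ → α → γ)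
    (a : β) (b : γ) :
    l.foldl (fun acc x => (g1 acc.1 x, g2 acc.2 x)) (a, b) = (l.foldl g1 a, l.foldl g2 b) := by
  induction l generalizing a b with
  | nil => rfl
  | cons h t ih => simp [List.foldl_cons, ih]

-- `0 in tuple(sorted(l))` for a 4-element list l is just membership in l
theorem pvMem0_tup4_sorted (l : List Int) (h : l.length = 4) :
    pvMem0 (pvTup4 (PySem.List.sorted l (fun x => x) false)) = decide ((0 : Int) ∈ l) := by
  have hp := PySem.List.sorted_perm l (fun x : Int => x) false
  have hlen : (PySem.List.sorted l (fun x : Int => x) false).length = 4 := by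
    rw [hp.length_eq, h]
  have hmem : ((0 : Int) ∈ PySem.List.sorted l (fun x : Int => x) false) ↔ (0 : Int) ∈ l :=
    PySem.List.mem_sorted l (fun x => x) false 0
  rcases hs : PySem.List.sorted l (fun x : Int => x) false with _ | ⟨a, _ | ⟨b, _ | ⟨c, _ | ⟨d, _ | _⟩⟩⟩⟩ <;>
    simp [hs] at hlen ⊢
  rw [hs] at hmem
  rw [← decide_eq_decide.mpr hmem, Bool.eq_iff_iff]
  simp only [pvTup4, pvMem0, Bool.or_eq_true, beq_iff_eq, decide_eq_true_eq, List.mem_cons,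
    List.not_mem_nil, or_false]
  tauto
  infer_instance

-- (p + i) % 12 == 0  ↔  i = (-p) % 12,  for 0 ≤ i < 12
theorem pv_same_hit (p i : Int) (h0 : 0 ≤ i) (h1 : i < 12) :
    PySem.Int.mod (p + i) 12 = 0 ↔ i = PySem.Int.mod (-p) 12 := by
  rw [PySem.Int.mod_eq_emod_of_pos (by norm_num), PySem.Int.mod_eq_emod_of_pos (by norm_num)]
  omega

-- (i - p) % 12 == 0  ↔  i = p % 12,  for 0 ≤ i < 12
theorem pv_opp_hit (p i : Int) (h0 : 0 ≤ i) (h1 : i < 12) :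
    PySem.Int.mod (i - p) 12 = 0 ↔ i = PySem.Int.mod p 12 := by
  rw [PySem.Int.mod_eq_emod_of_pos (by norm_num), PySem.Int.mod_eq_emod_of_pos (by norm_num)]
  omega

-- the indices of range(12) that pass a membership test against a list of residues
-- are exactly sorted(set(residues))
theorem pv_filter_range_eq_sorted_set (nl : List Int) (hnl : ∀ x ∈ nl, 0 ≤ x ∧ x < 12) :
    (PySem.List.pyRange 0 12 1).filter (fun i => decide (i ∈ nl)) =
      PySem.List.sorted (PySem.Set.ofList nl) (fun x => x) false := by
  refine (PySem.List.sorted_eq_of_perm_of_pairwise_lt (PySem.Set.ofList nl) _ (fun x : Int => x) ?_ ?_).symm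
  · rw [List.perm_ext_iff_of_nodup
      (List.Nodup.filter _ (PySem.List.nodup_pyRange_one 0 12))
      (PySem.Set.nodup_ofList nl)]
    intro a
    simp only [List.mem_filter, PySem.List.mem_pyRange_one, PySem.Set.mem_ofList, decide_eq_true_eq]
    constructor
    · rintro ⟨_, hm⟩; exact hm
    · intro hm; exact ⟨⟨(hnl a hm).1, (hnl a hm).2⟩, hm⟩
  · exact List.Pairwise.filter _ (PySem.List.pairwise_lt_pyRange_one 0 12)

-- ===== VERDICT (by name: the statement is the Claim_ definition above) =====
theorem all_liner_with_zero_spec : Claim_equal_all_liner_with_zero := by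
  intro ps _
  unfold Spec_all_liner_with_zero all_liner_with_zero all_liner_with_zero_alt
  simp only []
  have hsplit :
      List.foldl
        (fun (acc : List (Int × Int × Int × Int) × List (Int × Int × Int × Int)) i =>
          (if pvMem0 (pvSdp ps i) = true then acc.1 ++ [pvSdp ps i] else acc.1,
           if pvMem0 (pvOdp ps i) = true then acc.2 ++ [pvOdp ps i] else acc.2))
        ([], []) (PySem.List.pyRange 0 12) =
      (List.foldl (fun acc i => if pvMem0 (pvSdp ps i) = true then acc ++ [pvSdp ps i] else acc)
        [] (PySem.List.pyRange 0 12),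
       List.foldl (fun acc i => if pvMem0 (pvOdp ps i) = true then acc ++ [pvOdp ps i] else acc)
        [] (PySem.List.pyRange 0 12)) :=
    pv_foldl_split (PySem.List.pyRange 0 12)
      (fun acc i => if pvMem0 (pvSdp ps i) = true then acc ++ [pvSdp ps i] else acc)
      (fun acc i => if pvMem0 (pvOdp ps i) = true then acc ++ [pvOdp ps i] else acc) [] []
  rw [hsplit]
  rw [PySem.List.foldl_append_if (fun i => pvMem0 (pvSdp ps i)) (fun i => pvSdp ps i),
      PySem.List.foldl_append_if (fun i => pvMem0 (pvOdp ps i)) (fun i => pvOdp ps i)]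
  simp only [List.nil_append]
  have hmod : ∀ x : Int, 0 ≤ PySem.Int.mod x 12 ∧ PySem.Int.mod x 12 < 12 := by
    intro x
    rw [PySem.Int.mod_eq_emod_of_pos (by norm_num)]
    omega
  congr 1
  · rw [List.filter_congr (p := fun i => pvMem0 (pvSdp ps i))
        (q := fun i => decide (i ∈ [PySem.Int.mod (-ps.1) 12, PySem.Int.mod (-ps.2.1) 12,
          PySem.Int.mod (-ps.2.2.1) 12, PySem.Int.mod (-ps.2.2.2) 12]))]
    · rw [pv_filter_range_eq_sorted_set]
      intro x hx
      simp only [List.mem_cons, List.not_mem_nil, or_false] at hx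
      rcases hx with h | h | h | h <;> (subst h; exact hmod _)
    · intro i hi
      rw [PySem.List.mem_pyRange_one] at hi
      unfold pvSdp
      rw [pvMem0_tup4_sorted _ (by simp)]
      simp only [List.mem_cons, List.not_mem_nil, or_false, decide_eq_decide]
      rw [eq_comm (b := PySem.Int.mod (ps.1 + i) 12), eq_comm (b := PySem.Int.mod (ps.2.1 + i) 12),
          eq_comm (b := PySem.Int.mod (ps.2.2.1 + i) 12), eq_comm (b := PySem.Int.mod (ps.2.2.2 + i) 12)]
      rw [pv_same_hit _ _ hi.1 hi.2, pv_same_hit _ _ hi.1 hi.2,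
          pv_same_hit _ _ hi.1 hi.2, pv_same_hit _ _ hi.1 hi.2]
  · rw [List.filter_congr (p := fun i => pvMem0 (pvOdp ps i))
        (q := fun i => decide (i ∈ [PySem.Int.mod ps.1 12, PySem.Int.mod ps.2.1 12,
          PySem.Int.mod ps.2.2.1 12, PySem.Int.mod ps.2.2.2 12]))]
    · rw [pv_filter_range_eq_sorted_set]
      intro x hx
      simp only [List.mem_cons, List.not_mem_nil, or_false] at hx
      rcases hx with h | h | h | h <;> (subst h; exact hmod _)
    · intro i hi
      rw [PySem.List.mem_pyRange_one] at hi
      unfold pvOdp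
      rw [pvMem0_tup4_sorted _ (by simp)]
      simp only [List.mem_cons, List.not_mem_nil, or_false, decide_eq_decide]
      rw [eq_comm (b := PySem.Int.mod (i - ps.1) 12), eq_comm (b := PySem.Int.mod (i - ps.2.1) 12),
          eq_comm (b := PySem.Int.mod (i - ps.2.2.1) 12), eq_comm (b := PySem.Int.mod (i - ps.2.2.2) 12)]
      rw [pv_opp_hit _ _ hi.1 hi.2, pv_opp_hit _ _ hi.1 hi.2,
          pv_opp_hit _ _ hi.1 hi.2, pv_opp_hit _ _ hi.1 hi.2]
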